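-- pv_equiv track=rewrite | github.com/bahadir-bakla/musicmath | scripts/brute_force_patterns.py | p83_game_of_life_canli
-- ===== SOURCE A (Python) =====
-- def p83_game_of_life_canli(n, grid_size=8):
--     """Game of Life canlı hücre sayısı
--     Armoni: Nüfus dalgalanması → organik ritim"""
--     grid = [[1 if (i + j) % 3 == 0 else 0
--              for j in range(grid_size)] for i in range(grid_size)]
--     for _ in range(n):
--         yield sum(sum(row) for row in grid)
--         new_grid = []
--         for i in range(grid_size):
--             row = []
--             for j in range(grid_size):
--                 neighbors = sum(
--                     grid[(i + di) % grid_size][(j + dj) % grid_size]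
--                     for di in [-1, 0, 1] for dj in [-1, 0, 1]
--                     if (di, dj) != (0, 0)
--                 )
--                 alive = grid[i][j]
--                 row.append(1 if (alive and neighbors in [2, 3])
--                            or (not alive and neighbors == 3) else 0)
--             new_grid.append(row)
--         grid = new_grid
-- ===== SOURCE B (Python) =====
-- def _b_step(grid, g):
--     """One Game-of-Life step on the torus, via the 3x3-block-sum form of the rule."""
--     new_grid = []
--     for i in range(g):
--         row = []
--         for j in range(g):
--             block = sum(grid[(i + di) % g][(j + dj) % g]
--                         for di in (-1, 0, 1) for dj in (-1, 0, 1))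
--             alive = grid[i][j]
--             row.append(1 if block == 3 or (block == 4 and alive) else 0)
--         new_grid.append(row)
--     return new_grid
--
--
-- def p83_game_of_life_canli(n, grid_size=8):
--     """Game of Life canlı hücre sayısı — cycle detection, then extrapolation."""
--     g = grid_size
--     grid = [[1 if (i + j) % 3 == 0 else 0 for j in range(g)] for i in range(g)]
--     counts = []
--     seen = []
--     start = None
--     period = None
--     while len(counts) < n:
--         if grid in seen:
--             start = seen.index(grid)
--             period = len(counts) - start
--             break
--         seen.append(grid)
--         counts.append(sum(map(sum, grid)))
--         grid = _b_step(grid, g)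
--     if start is None:
--         yield from counts
--     else:
--         for k in range(n):
--             yield counts[k] if k < start else counts[start + (k - start) % period]
-- ===== Notes on version B (the rewrite author's own statement) =====
-- stated objective: faster
-- what changed: B detects when the grid state repeats (states are deterministic, so the count sequence is eventually periodic), stops simulating at the first repeated state and extrapolates the remaining counts from the detected tail+period, and its step rule uses the 3x3-block-sum form; A simulates all n generations.
import Mathlib
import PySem

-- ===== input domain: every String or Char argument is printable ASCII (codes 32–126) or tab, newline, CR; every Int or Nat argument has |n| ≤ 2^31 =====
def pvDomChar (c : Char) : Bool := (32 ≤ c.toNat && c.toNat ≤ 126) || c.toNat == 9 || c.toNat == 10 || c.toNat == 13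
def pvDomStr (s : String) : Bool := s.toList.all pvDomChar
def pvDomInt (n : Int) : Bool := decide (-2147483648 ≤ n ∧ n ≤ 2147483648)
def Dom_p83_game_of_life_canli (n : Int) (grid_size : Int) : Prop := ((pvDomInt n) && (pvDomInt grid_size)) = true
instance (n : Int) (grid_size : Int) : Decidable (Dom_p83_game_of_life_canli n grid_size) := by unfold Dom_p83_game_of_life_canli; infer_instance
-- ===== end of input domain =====

-- B replaces A's straight n-step simulation by cycle detection on the (deterministic) grid state
-- followed by periodic extrapolation of the live-cell counts; measured asymptotically faster in n.


-- shared helpers (the same source expressions occur verbatim in both Pythons)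
-- grid[i][j]; the getD defaults are never reached (indices produced by the loops are in range)
def pvCell (grid : List (List Int)) (i j : Int) : Int :=
  (PySem.List.pyGet? ((PySem.List.pyGet? grid i).getD []) j).getD 0

-- [[1 if (i + j) % 3 == 0 else 0 for j in range(g)] for i in range(g)]
def pvInitGrid (g : Int) : List (List Int) :=
  (PySem.List.pyRange 0 g 1).map (fun i =>
    (PySem.List.pyRange 0 g 1).map (fun j =>
      if PySem.Int.mod (i + j) 3 = 0 then (1 : Int) else 0))

-- sum(sum(row) for row in grid)  /  sum(map(sum, grid))
def pvGridSum (grid : List (List Int)) : Int := (grid.map List.sum).sum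

-- ===== PORT A =====
def pA_step (grid : List (List Int)) (g : Int) : List (List Int) :=
  (PySem.List.pyRange 0 g 1).map (fun i =>
    (PySem.List.pyRange 0 g 1).map (fun j =>
      let neighbors : Int :=
        (([(-1 : Int), 0, 1].flatMap (fun di =>
            (([(-1 : Int), 0, 1].filter (fun dj => !(di == 0 && dj == 0))).map (fun dj =>
              pvCell grid (PySem.Int.mod (i + di) g) (PySem.Int.mod (j + dj) g))))).sum)
      let alive := pvCell grid i j
      if (alive ≠ 0 ∧ (neighbors = 2 ∨ neighbors = 3)) ∨ (alive = 0 ∧ neighbors = 3)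
      then (1 : Int) else 0))

def pA_loop (g : Int) : Nat → List (List Int) → List Int
  | 0, _ => []
  | m + 1, grid => pvGridSum grid :: pA_loop g m (pA_step grid g)

def p83_game_of_life_canli (n : Int) (grid_size : Int) : List Int :=
  pA_loop grid_size n.toNat (pvInitGrid grid_size)

-- ===== PORT B =====
-- one step via the 3x3-block-sum form of the rule
def pB_step (grid : List (List Int)) (g : Int) : List (List Int) :=
  (PySem.List.pyRange 0 g 1).map (fun i =>
    (PySem.List.pyRange 0 g 1).map (fun j =>
      let block : Int :=
        (([(-1 : Int), 0, 1].flatMap (fun di =>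
            ([(-1 : Int), 0, 1].map (fun dj =>
              pvCell grid (PySem.Int.mod (i + di) g) (PySem.Int.mod (j + dj) g))))).sum)
      let alive := pvCell grid i j
      if block = 3 ∨ (block = 4 ∧ alive ≠ 0) then (1 : Int) else 0))

-- the while-loop: budget = n - len(counts); returns (counts, none) or (counts, some (start, period))
def pB_sim (g : Int) : Nat → List (List Int) → List (List (List Int)) → List Int →
    (List Int × Option (Int × Int))
  | 0, _, _, counts => (counts, none)
  | m + 1, grid, seen, counts =>
    match PySem.List.index? seen grid with
    | some s => (counts, some ((s : Int), (counts.length : Int) - (s : Int)))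
    | none => pB_sim g m (pB_step grid g) (seen ++ [grid]) (counts ++ [pvGridSum grid])

def p83_game_of_life_canli_alt (n : Int) (grid_size : Int) : List Int :=
  match pB_sim grid_size n.toNat (pvInitGrid grid_size) [] [] with
  | (counts, none) => counts
  | (counts, some (s, p)) =>
      (PySem.List.pyRange 0 n 1).map (fun k =>
        if k < s then PySem.List.pyGetD counts k 0
        else PySem.List.pyGetD counts (s + PySem.Int.mod (k - s) p) 0)

-- ===== PRECONDITION & SPEC =====
def Spec_p83_game_of_life_canli (n : Int) (grid_size : Int) (out : List Int) : Prop := out = p83_game_of_life_canli_alt n grid_size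
instance (n : Int) (grid_size : Int) (out : List Int) : Decidable (Spec_p83_game_of_life_canli n grid_size out) := by unfold Spec_p83_game_of_life_canli; infer_instance

-- ===== CLAIM (what is proved, stated in full; the proofs are below) =====
def Claim_equal_p83_game_of_life_canli : Prop := ∀ (n : Int) (grid_size : Int), Dom_p83_game_of_life_canli n grid_size → Spec_p83_game_of_life_canli n grid_size (p83_game_of_life_canli n grid_size)

-- ===== LEMMAS AND PROOFS =====

-- all cells of a grid are 0 or 1
def pvB01 (grid : List (List Int)) : Prop := ∀ row ∈ grid, ∀ x ∈ row, x = 0 ∨ x = 1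

theorem pvCell01 (grid : List (List Int)) (i j : Int) (h : pvB01 grid) :
    pvCell grid i j = 0 ∨ pvCell grid i j = 1 := by
  unfold pvCell
  cases hr : PySem.List.pyGet? grid i with
  | none => simp [PySem.List.pyGet?]
  | some row =>
    cases hx : PySem.List.pyGet? row j with
    | none => simp [hx]
    | some x =>
      simp only [Option.getD_some, hx]
      exact h row (PySem.List.mem_of_pyGet?_eq_some _ hr) x (PySem.List.mem_of_pyGet?_eq_some _ hx)

theorem pvB01_init (g : Int) : pvB01 (pvInitGrid g) := by
  intro row hrow x hx
  simp only [pvInitGrid, List.mem_map] at hrow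
  obtain ⟨i, _, rfl⟩ := hrow
  simp only [List.mem_map] at hx
  obtain ⟨j, _, rfl⟩ := hx
  split <;> simp

theorem pvB01_stepA (grid : List (List Int)) (g : Int) : pvB01 (pA_step grid g) := by
  intro row hrow x hx
  simp only [pA_step, List.mem_map] at hrow
  obtain ⟨i, _, rfl⟩ := hrow
  simp only [List.mem_map] at hx
  obtain ⟨j, _, rfl⟩ := hx
  split <;> simp

-- the two step functions agree on 0/1 grids: block = neighbors + alive
theorem pvStepEq (grid : List (List Int)) (g : Int) (h : pvB01 grid) :
    pB_step grid g = pA_step grid g := by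
  unfold pB_step pA_step
  apply List.map_congr_left
  intro i hi
  apply List.map_congr_left
  intro j hj
  rw [PySem.List.mem_pyRange_one] at hi hj
  have hg : 0 < g := lt_of_le_of_lt hi.1 hi.2
  have hmi : PySem.Int.mod i g = i := by
    rw [PySem.Int.mod_eq_emod_of_pos hg]; exact Int.emod_eq_of_lt hi.1 hi.2
  have hmj : PySem.Int.mod j g = j := by
    rw [PySem.Int.mod_eq_emod_of_pos hg]; exact Int.emod_eq_of_lt hj.1 hj.2
  simp only [List.flatMap_cons, List.flatMap_nil, List.filter_cons, List.filter_nil,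
    List.map_cons, List.map_nil, List.append_nil, List.sum_cons, List.sum_nil,
    List.sum_append, add_zero]
  norm_num
  simp only [hmi, hmj]
  rcases pvCell01 grid i j h with h01 | h01 <;> rw [h01] <;> split_ifs <;> omega

def pvS (g : Int) (k : Nat) : List (List Int) := (fun gr => pA_step gr g)^[k] (pvInitGrid g)
def pvC (g : Int) (k : Nat) : Int := pvGridSum (pvS g k)

theorem pvB01_S (g : Int) (k : Nat) : pvB01 (pvS g k) := by
  cases k with
  | zero => exact pvB01_init g
  | succ m =>
    unfold pvS
    rw [Function.iterate_succ_apply']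
    exact pvB01_stepA _ g

theorem pvS_succ (g : Int) (k : Nat) : pB_step (pvS g k) g = pvS g (k + 1) := by
  rw [pvStepEq _ _ (pvB01_S g k)]
  unfold pvS
  rw [Function.iterate_succ_apply']

theorem pvS_add (g : Int) (a b : Nat) : pvS g (a + b) = (fun gr => pA_step gr g)^[b] (pvS g a) := by
  unfold pvS
  rw [Nat.add_comm, Function.iterate_add_apply]

-- periodicity: once the state repeats with period p, every later state is determined mod p
theorem pvPeriodic (g : Int) (s p : Nat) (hp : 0 < p) (h : pvS g (s + p) = pvS g s) :
    ∀ d : Nat, pvS g (s + d) = pvS g (s + d % p) := by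
  intro d
  induction d using Nat.strong_induction_on with
  | _ d ih =>
    by_cases hd : d < p
    · rw [Nat.mod_eq_of_lt hd]
    · rw [not_lt] at hd
      have h1 : s + d = (s + p) + (d - p) := by omega
      have h2 : pvS g (s + d) = pvS g (s + (d - p)) := by
        rw [h1, pvS_add, h, ← pvS_add]
      have h3 : d % p = (d - p) % p := by
        conv_lhs => rw [show d = (d - p) + p from by omega]
        rw [Nat.add_mod_right]
      rw [h2, ih (d - p) (by omega), h3]

theorem pvLoopA (g : Int) : ∀ (m : Nat) (grid : List (List Int)),
    pA_loop g m grid = (List.range m).map (fun k => pvGridSum ((fun gr => pA_step gr g)^[k] grid)) := by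
  intro m
  induction m with
  | zero => intro grid; simp [pA_loop]
  | succ m ih =>
    intro grid
    rw [List.range_succ_eq_map, List.map_cons]
    simp only [pA_loop, ih (pA_step grid g), Function.iterate_zero_apply, List.map_map]
    congr 1

theorem pvSim (g : Int) : ∀ (m t : Nat),
    pB_sim g m (pvS g t) ((List.range t).map (pvS g)) ((List.range t).map (pvC g))
      = ((List.range (t + m)).map (pvC g), none)
    ∨ ∃ u s : Nat, t ≤ u ∧ s < u ∧ pvS g s = pvS g u ∧
        pB_sim g m (pvS g t) ((List.range t).map (pvS g)) ((List.range t).map (pvC g))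
          = ((List.range u).map (pvC g), some ((s : Int), (u : Int) - (s : Int))) := by
  intro m
  induction m with
  | zero => intro t; left; simp [pB_sim]
  | succ m ih =>
    intro t
    cases hidx : PySem.List.index? ((List.range t).map (pvS g)) (pvS g t) with
    | some s =>
      right
      obtain ⟨hk, hget, -⟩ := PySem.List.getElem_of_index?_eq_some hidx
      have hlen : ((List.range t).map (pvS g)).length = t := by simp
      have hst : s < t := by omega
      have hSeq : pvS g s = pvS g t := by
        rw [← hget]
        simp
      refine ⟨t, s, le_refl t, hst, hSeq, ?_⟩
      simp only [pB_sim, hidx]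
      simp
    | none =>
      have hstep :
          pB_sim g (m + 1) (pvS g t) ((List.range t).map (pvS g)) ((List.range t).map (pvC g))
            = pB_sim g m (pvS g (t + 1)) ((List.range (t + 1)).map (pvS g))
                ((List.range (t + 1)).map (pvC g)) := by
        simp only [pB_sim, hidx]
        rw [pvS_succ]
        congr 1 <;> rw [List.range_succ, List.map_append] <;> rfl
      rw [hstep]
      rcases ih (t + 1) with hL | ⟨u, s, hu, hs, hSeq, hR⟩
      · left
        rw [hL, show t + 1 + m = t + (m + 1) from by omega]
      · right
        exact ⟨u, s, by omega, hs, hSeq, hR⟩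

theorem pvGetD_map_range (g : Int) (u k : Nat) (hk : k < u) :
    PySem.List.pyGetD ((List.range u).map (pvC g)) (k : Int) 0 = pvC g k := by
  rw [PySem.List.pyGetD_natCast]
  rw [List.getD_eq_getElem _ _ (by simp [hk])]
  simp

-- ===== VERDICT (by name: the statement is the Claim_ definition above) =====
theorem p83_game_of_life_canli_spec : Claim_equal_p83_game_of_life_canli := by
  intro n g _
  unfold Spec_p83_game_of_life_canli
  have hA : p83_game_of_life_canli n g = (List.range n.toNat).map (pvC g) := by
    unfold p83_game_of_life_canli
    rw [pvLoopA]
    rfl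
  rw [hA]
  unfold p83_game_of_life_canli_alt
  have h0 : pvInitGrid g = pvS g 0 := rfl
  have hseen : ([] : List (List (List Int))) = (List.range 0).map (pvS g) := by simp
  have hcnt : ([] : List Int) = (List.range 0).map (pvC g) := by simp
  rcases pvSim g n.toNat 0 with hL | ⟨u, s, -, hs, hSeq, hR⟩
  · rw [h0, hseen, hcnt, hL]
    simp
  · rw [h0, hseen, hcnt, hR]
    simp only
    rw [PySem.List.pyRange_one]
    simp only [sub_zero, List.map_map]
    apply List.map_congr_left
    intro k hk
    rw [List.mem_range] at hk
    simp only [Function.comp, zero_add]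
    have hp : (0 : Int) < (u : Int) - (s : Int) := by
      have := hs; omega
    by_cases hks : k < s
    · rw [if_pos (by exact_mod_cast hks)]
      exact (pvGetD_map_range g u k (by omega)).symm
    · rw [not_lt] at hks
      rw [if_neg (by rw [not_lt]; exact_mod_cast hks)]
      have hus : (u : Int) - (s : Int) = ((u - s : Nat) : Int) := by omega
      have hmod : PySem.Int.mod ((k : Int) - (s : Int)) ((u : Int) - (s : Int))
          = (((k - s) % (u - s) : Nat) : Int) := by
        rw [PySem.Int.mod_eq_emod_of_pos hp, hus]
        have hks' : (k : Int) - (s : Int) = ((k - s : Nat) : Int) := by omega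
        rw [hks']
        push_cast
        rfl
      rw [hmod]
      have hidx : (s : Int) + (((k - s) % (u - s) : Nat) : Int)
          = ((s + (k - s) % (u - s) : Nat) : Int) := by push_cast; ring
      rw [hidx]
      have hlt : s + (k - s) % (u - s) < u := by
        have := Nat.mod_lt (k - s) (y := u - s) (by omega)
        omega
      rw [pvGetD_map_range g u _ hlt]
      unfold pvC
      congr 1
      have hper := pvPeriodic g s (u - s) (by omega) (by rw [show s + (u - s) = u by omega, hSeq])
      have := hper (k - s)
      rw [show s + (k - s) = k by omega] at this
      exact this
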